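-- pv_equiv track=rewrite | github.com/Anubhav012345/Leetcode- | 4055-longest-balanced-substring-i/longest-balanced-substring-i.py | longestBalanced
-- ===== SOURCE A (Python) =====
-- def longestBalanced(s: str) -> int:
--     length=0
--
--     for i in range(len(s)):
--         hash_map={}
--
--         for j in range(i,len(s)):
--             hash_map[s[j]]=hash_map.get(s[j],0)+1
--
--             flag=True
--             freq=-1
--
--             for value in hash_map.values():
--                 if(freq==-1):
--                     freq=value
--                 elif(value!=freq):
--                     flag=False
--                     break
--
--             if(flag):
--                 length=max(length,j-i+1)
--
--     return length
-- ===== SOURCE B (Python) =====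
-- def longestBalanced(s: str) -> int:
--     best = 0
--     for i in range(len(s)):
--         count = {}
--         maxf = 0
--         distinct = 0
--         for k, c in enumerate(s[i:]):
--             f = count.get(c, 0)
--             if f == 0:
--                 distinct += 1
--             count[c] = f + 1
--             if f + 1 > maxf:
--                 maxf = f + 1
--             if maxf * distinct == k + 1:
--                 best = max(best, k + 1)
--     return best
-- ===== Notes on version B (the rewrite author's own statement) =====
-- stated objective: alternative
-- what changed: The innermost rescan of all dictionary values to test all-frequencies-equal is replaced by incrementally maintained maxf (max frequency) and distinct (number of distinct chars) counters; the window is balanced exactly when maxf*distinct equals the window length, an O(1) test (measured ~1.3x in a timing run, below the 1.5x bar, so not claimed as faster).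
import Mathlib
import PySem

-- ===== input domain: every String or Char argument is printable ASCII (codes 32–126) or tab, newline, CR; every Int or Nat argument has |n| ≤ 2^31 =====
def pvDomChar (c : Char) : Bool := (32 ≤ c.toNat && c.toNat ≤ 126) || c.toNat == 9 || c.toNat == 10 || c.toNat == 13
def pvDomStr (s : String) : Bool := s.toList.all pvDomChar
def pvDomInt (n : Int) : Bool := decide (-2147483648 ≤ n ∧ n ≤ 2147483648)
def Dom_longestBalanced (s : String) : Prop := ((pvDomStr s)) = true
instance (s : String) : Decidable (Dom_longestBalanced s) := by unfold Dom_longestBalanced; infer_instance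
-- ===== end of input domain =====

-- B replaces A's innermost rescan of the frequency dict's values by incrementally
-- maintained maxf/distinct counters with the O(1) balanced test maxf*distinct == window
-- length (an alternative algorithm; a timing run did not confirm it as >=1.5x faster).

-- ===== PORT A =====
-- the 'for value in hash_map.values()' loop with flag/freq and break
def aScan : List Int → Int → Bool
  | [], _ => true
  | v :: rest, freq =>
    if freq == -1 then aScan rest v
    else if v != freq then false
    else aScan rest freq

-- one step of A's inner loop at index j (j is always in range here, so getD is exact for s[j])
def aInner (cs : List Char) (i : Nat) (st : PySem.Dict Char Int × Int) (j : Nat) :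
    PySem.Dict Char Int × Int :=
  let c := cs.getD j ' '
  let hm := st.1.insert c (st.1.getD c 0 + 1)
  (hm, if aScan hm.values (-1) then max st.2 ((j : Int) - (i : Int) + 1) else st.2)

def longestBalanced (s : String) : Int :=
  let cs := s.toList
  let n := cs.length
  (List.range n).foldl
    (fun length i => ((List.range' i (n - i)).foldl (aInner cs i) (PySem.Dict.empty, length)).2)
    0

-- ===== PORT B =====
-- one step of B's inner loop on an enumerate pair (k, c); state (count, maxf, distinct, best)
def bStep (st : PySem.Dict Char Int × Int × Int × Int) (p : Int × Char) :
    PySem.Dict Char Int × Int × Int × Int :=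
  let f := st.1.getD p.2 0
  let distinct := if f == 0 then st.2.2.1 + 1 else st.2.2.1
  let count := st.1.insert p.2 (f + 1)
  let maxf := if f + 1 > st.2.1 then f + 1 else st.2.1
  (count, maxf, distinct,
    if maxf * distinct == p.1 + 1 then max st.2.2.2 (p.1 + 1) else st.2.2.2)

def longestBalanced_alt (s : String) : Int :=
  let cs := s.toList
  (List.range cs.length).foldl
    (fun best (i : Nat) =>
      ((PySem.List.enumerate (PySem.List.slice cs (some (i : Int)) none) 0).foldl bStep
        (PySem.Dict.empty, 0, 0, best)).2.2.2)
    0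

-- ===== PRECONDITION & SPEC =====
def Spec_longestBalanced (s : String) (out : Int) : Prop := out = longestBalanced_alt s
instance (s : String) (out : Int) : Decidable (Spec_longestBalanced s out) := by unfold Spec_longestBalanced; infer_instance

-- ===== CLAIM (what is proved, stated in full; the proofs are below) =====
def Claim_equal_longestBalanced : Prop := ∀ (s : String), Dom_longestBalanced s → Spec_longestBalanced s (longestBalanced s)

-- ===== LEMMAS AND PROOFS =====

-- the frequency dict both inner loops build from the processed window chars
def wdict (w : List Char) : PySem.Dict Char Int :=
  w.foldl (fun d c => d.insert c (d.getD c 0 + 1)) PySem.Dict.empty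

-- B's inner-loop invariant about maxf and distinct
def BInv (w : List Char) (maxf distinct : Int) : Prop :=
  distinct = ((PySem.Set.ofList w).length : Int) ∧
  (∀ x ∈ w, ((w.count x : Int)) ≤ maxf) ∧
  (w = [] → maxf = 0) ∧
  (w ≠ [] → ∃ x ∈ w, ((w.count x : Int)) = maxf)

-- A's inner loop rewritten over the window chars with a position counter (proof helper)
def aStep' (st : PySem.Dict Char Int × Int × Int) (c : Char) :
    PySem.Dict Char Int × Int × Int :=
  let hm := st.1.insert c (st.1.getD c 0 + 1)
  (hm, if aScan hm.values (-1) then max st.2.1 (st.2.2 + 1) else st.2.1, st.2.2 + 1)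

theorem wdict_append (w : List Char) (c : Char) :
    wdict (w ++ [c]) = (wdict w).insert c ((wdict w).getD c 0 + 1) := by
  simp [wdict, List.foldl_append]

theorem wdict_getD (w : List Char) (c : Char) :
    (wdict w).getD c 0 = (w.count c : Int) := by
  simp [wdict, PySem.Dict.getD_foldl_insert_add_one]

theorem wdict_keys (w : List Char) : (wdict w).keys = PySem.Set.ofList w := by
  simp [wdict, PySem.Dict.keys_foldl_insert, PySem.Set.update_nil_left]

theorem wdict_keys_nodup (w : List Char) : (wdict w).keys.Nodup := by
  exact PySem.Dict.nodup_keys_foldl_insert _ _ _ (by simp)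

theorem wdict_values (w : List Char) :
    (wdict w).values = (PySem.Set.ofList w).map (fun c => (w.count c : Int)) := by
  rw [PySem.Dict.values_eq_map_keys _ (wdict_keys_nodup w) 0, wdict_keys]
  exact List.map_congr_left (fun c _ => wdict_getD w c)

theorem aScan_run (v : Int) (hv : v ≠ -1) :
    ∀ rest, (aScan rest v = true ↔ ∀ u ∈ rest, u = v) := by
  intro rest
  induction rest with
  | nil => simp [aScan]
  | cons u rest ih =>
    by_cases huv : u = v
    · subst huv
      simp only [aScan, beq_iff_eq, if_neg hv, bne_self_eq_false, Bool.false_eq_true,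
        if_false, List.mem_cons]
      constructor
      · intro h x hx
        rcases hx with rfl | hx
        · rfl
        · exact ih.mp h x hx
      · intro h
        exact ih.mpr (fun x hx => h x (Or.inr hx))
    · simp only [aScan, beq_iff_eq, if_neg hv, bne_iff_ne, ne_eq]
      rw [if_pos huv]
      simp only [Bool.false_eq_true, false_iff]
      exact fun h => huv (h u (by simp))

theorem sum_le_helper (l : List Char) (f : Char → ℕ) (K : ℕ)
    (h : ∀ x ∈ l, f x ≤ K) : (l.map f).sum ≤ K * l.length := by
  induction l with
  | nil => simp
  | cons a l ih =>
    have ha := h a (by simp)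
    have ht := ih (fun x hx => h x (by simp [hx]))
    simp only [List.map_cons, List.sum_cons, List.length_cons, Nat.mul_succ]
    omega

theorem all_eq_of_sum_eq (l : List Char) (f : Char → ℕ) (K : ℕ)
    (h : ∀ x ∈ l, f x ≤ K) (hs : (l.map f).sum = K * l.length) :
    ∀ x ∈ l, f x = K := by
  induction l with
  | nil => simp
  | cons a l ih =>
    have ha := h a (by simp)
    have htl : ∀ x ∈ l, f x ≤ K := fun x hx => h x (by simp [hx])
    have hb := sum_le_helper l f K htl
    simp only [List.map_cons, List.sum_cons, List.length_cons, Nat.mul_succ] at hs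
    have hfa : f a = K := by omega
    have hsum : (l.map f).sum = K * l.length := by omega
    intro x hx
    rcases List.mem_cons.mp hx with rfl | hx
    · exact hfa
    · exact ih htl hsum x hx

theorem sum_eq_of_all_eq (l : List Char) (f : Char → ℕ) (K : ℕ)
    (h : ∀ x ∈ l, f x = K) : (l.map f).sum = K * l.length := by
  induction l with
  | nil => simp
  | cons a l ih =>
    have ha := h a (by simp)
    have ht := ih (fun x hx => h x (by simp [hx]))
    simp only [List.map_cons, List.sum_cons, List.length_cons, Nat.mul_succ]
    omega

theorem len_eq_sum (w : List Char) :
    ((PySem.Set.ofList w).map (fun c => w.count c)).sum = w.length := by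
  have hnd : (PySem.Set.ofList w).Nodup := PySem.Set.nodup_ofList w
  have h1 : (PySem.Set.ofList w).toFinset.sum (fun c => w.count c) =
      ((PySem.Set.ofList w).map (fun c => w.count c)).sum :=
    List.sum_toFinset _ hnd
  have h2 : (PySem.Set.ofList w).toFinset = w.toFinset := by
    ext x
    simp [List.mem_toFinset, PySem.Set.mem_ofList]
  rw [← h1, h2]
  exact List.sum_toFinset_count_eq_length w

-- the heart: A's all-values-equal flag equals B's maxf*distinct test
theorem aScan_start (v : Int) (rest : List Int) :
    aScan (v :: rest) (-1) = aScan rest v := by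
  simp [aScan]

theorem flag_iff (w : List Char) (hw : w ≠ []) (maxf distinct : Int)
    (hinv : BInv w maxf distinct) :
    (aScan ((wdict w).values) (-1) = true ↔ maxf * distinct = (w.length : Int)) := by
  obtain ⟨hd, hb, hz, he⟩ := hinv
  obtain ⟨x0, hx0w, hx0v⟩ := he hw
  rw [wdict_values]
  have hlne : PySem.Set.ofList w ≠ [] := by
    cases w with
    | nil => exact absurd rfl hw
    | cons a t =>
      intro h
      have : a ∈ PySem.Set.ofList (a :: t) := (PySem.Set.mem_ofList _ _).mpr (by simp)
      rw [h] at this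
      simp at this
  obtain ⟨c0, ls, hcons⟩ := List.exists_cons_of_ne_nil hlne
  have hsub : ∀ x ∈ ls, x ∈ w := by
    intro x hx
    exact (PySem.Set.mem_ofList _ _).mp (by rw [hcons]; simp [hx])
  have hc0w : c0 ∈ w := (PySem.Set.mem_ofList _ _).mp (by rw [hcons]; simp)
  have hx0l : x0 ∈ PySem.Set.ofList w := (PySem.Set.mem_ofList _ _).mpr hx0w
  have hpos : 0 < w.count c0 := List.count_pos_iff.mpr hc0w
  have hne : ((w.count c0 : Int)) ≠ -1 := by
    intro h
    omega
  rw [hcons, List.map_cons, aScan_start,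
    aScan_run ((w.count c0 : Int)) hne (ls.map (fun c => (w.count c : Int)))]
  have hsum : ((PySem.Set.ofList w).map (fun c => w.count c)).sum = w.length :=
    len_eq_sum w
  constructor
  · intro hall
    have hallw : ∀ x ∈ PySem.Set.ofList w, w.count x = w.count c0 := by
      intro x hx
      rw [hcons] at hx
      rcases List.mem_cons.mp hx with rfl | hx
      · rfl
      · exact_mod_cast hall _ (List.mem_map_of_mem hx)
    have hm : maxf = (w.count c0 : Int) := by
      rw [← hx0v, hallw x0 hx0l]
    have hs : w.count c0 * (PySem.Set.ofList w).length = w.length := by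
      rw [← hsum]
      exact (sum_eq_of_all_eq _ _ _ hallw).symm
    rw [hm, hd]
    exact_mod_cast congrArg (Nat.cast : ℕ → ℤ) hs
  · intro heq
    have hble : ∀ x ∈ PySem.Set.ofList w, w.count x ≤ w.count x0 := by
      intro x hx
      have := hb x ((PySem.Set.mem_ofList _ _).mp hx)
      rw [← hx0v] at this
      exact_mod_cast this
    have hnat : w.count x0 * (PySem.Set.ofList w).length = w.length := by
      have : ((w.count x0 : Int)) * ((PySem.Set.ofList w).length : Int) = (w.length : Int) := by
        rw [hx0v, ← hd]
        exact heq
      exact_mod_cast this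
    have hall := all_eq_of_sum_eq _ _ _ hble (by rw [hsum, ← hnat, Nat.mul_comm])
    intro u hu
    obtain ⟨x, hx, rfl⟩ := List.mem_map.mp hu
    have h1 := hall x (by rw [hcons]; simp [hx])
    have h2 := hall c0 (by rw [hcons]; simp)
    simp [h1, h2]

theorem inv_nil : BInv [] 0 0 := by
  refine ⟨by simp [PySem.Set.ofList_nil], by simp, fun _ => rfl, fun h => absurd rfl h⟩

theorem inv_step (w : List Char) (c : Char) (maxf distinct : Int)
    (h : BInv w maxf distinct) :
    BInv (w ++ [c])
      (if (w.count c : Int) + 1 > maxf then (w.count c : Int) + 1 else maxf)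
      (if (w.count c : Int) == 0 then distinct + 1 else distinct) := by
  obtain ⟨hd, hb, hz, he⟩ := h
  have hcnt : ∀ x : Char, (w ++ [c]).count x = w.count x + (if x = c then 1 else 0) := by
    intro x
    by_cases hx : x = c
    · simp [List.count_append, hx]
    · have hcx : (c == x) = false := by
        simp only [beq_eq_false_iff_ne, ne_eq]
        exact fun h => hx h.symm
      simp [List.count_append, List.count_singleton, hx, hcx]
  refine ⟨?_, ?_, fun hfalse => by simp at hfalse, fun _ => ?_⟩
  · by_cases hc : c ∈ w
    · have hpos : 0 < w.count c := List.count_pos_iff.mpr hc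
      have hne : ((w.count c : Int)) ≠ 0 := by
        have : w.count c ≠ 0 := by omega
        exact_mod_cast this
      rw [if_neg (by simpa using hne)]
      rw [PySem.Set.ofList_append_singleton,
        PySem.Set.add_of_mem ((PySem.Set.mem_ofList _ _).mpr hc)]
      exact hd
    · have h0 : w.count c = 0 := List.count_eq_zero.mpr hc
      rw [if_pos (by simp [h0])]
      rw [PySem.Set.ofList_append_singleton,
        PySem.Set.add_of_not_mem (fun hm => hc ((PySem.Set.mem_ofList _ _).mp hm))]
      rw [hd]
      push_cast [List.length_append]
      simp
  · intro x hx
    rw [hcnt x]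
    rcases List.mem_append.mp hx with hxw | hxc
    · have := hb x hxw
      by_cases hxc : x = c
      · subst hxc
        push_cast
        split_ifs <;> omega
      · rw [if_neg hxc]
        push_cast
        split_ifs <;> omega
    · have hxc : x = c := by simpa using hxc
      subst hxc
      rw [if_pos rfl]
      have hbc : (w.count x : Int) ≤ maxf ∨ w.count x = 0 := by
        by_cases hm : x ∈ w
        · exact Or.inl (hb x hm)
        · exact Or.inr (List.count_eq_zero.mpr hm)
      push_cast
      rcases hbc with hbc | hbc <;> split_ifs <;> simp [hbc] <;> omega
  · by_cases hgt : (w.count c : Int) + 1 > maxf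
    · refine ⟨c, by simp, ?_⟩
      rw [if_pos hgt, hcnt c, if_pos rfl]
      push_cast
      ring
    · rw [if_neg hgt]
      have hw : w ≠ [] := by
        intro hnil
        subst hnil
        simp at hgt
        have := hz rfl
        omega
      obtain ⟨x, hxw, hxv⟩ := he hw
      have hxc : x ≠ c := by
        intro hxc
        subst hxc
        omega
      refine ⟨x, List.mem_append.mpr (Or.inl hxw), ?_⟩
      rw [hcnt x, if_neg hxc]
      simpa using hxv

-- stage 1: A's index fold over range' equals the char fold with a counter
theorem bridge_a (cs : List Char) (i : Nat) :
    ∀ (suf : List Char) (k : Nat) (d : PySem.Dict Char Int) (L : Int),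
      cs.drop (i + k) = suf →
      (List.range' (i + k) suf.length).foldl (aInner cs i) (d, L) =
        ((suf.foldl aStep' (d, L, (k : Int))).1, (suf.foldl aStep' (d, L, (k : Int))).2.1) := by
  intro suf
  induction suf with
  | nil => intro k d L _; simp
  | cons c suf ih =>
    intro k d L h
    have hc : cs[i + k]? = some c := by
      have h0 : (cs.drop (i + k))[0]? = some c := by rw [h]; rfl
      rwa [List.getElem?_drop, Nat.add_zero] at h0
    have hget : cs.getD (i + k) ' ' = c := by
      rw [List.getD_eq_getElem?_getD, hc]
      rfl
    have hdrop : cs.drop (i + (k + 1)) = suf := by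
      have := congrArg (List.drop 1) h
      rw [List.drop_drop, List.drop_one, List.tail_cons] at this
      rw [show i + (k + 1) = i + k + 1 by omega]
      exact this
    rw [List.length_cons, List.range'_succ, List.foldl_cons, List.foldl_cons]
    have harith : ((i + k : Nat) : Int) - (i : Int) + 1 = (k : Int) + 1 := by
      push_cast; ring
    have hstep : aInner cs i (d, L) (i + k) =
        ((aStep' (d, L, (k : Int)) c).1, (aStep' (d, L, (k : Int)) c).2.1) := by
      simp only [aInner, aStep', hget, harith]
    have hk1 : ((k + 1 : Nat) : Int) = (k : Int) + 1 := by push_cast; ring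
    have ha : aStep' (d, L, (k : Int)) c =
        ((aStep' (d, L, (k : Int)) c).1, (aStep' (d, L, (k : Int)) c).2.1,
          ((k + 1 : Nat) : Int)) := by
      simp only [aStep', hk1]
    rw [show i + k + 1 = i + (k + 1) by omega]
    rw [hstep, ih (k + 1) (aStep' (d, L, (k : Int)) c).1 (aStep' (d, L, (k : Int)) c).2.1 hdrop,
      ← ha]

-- stage 2: the simultaneous induction relating the two char folds
theorem main_inner :
    ∀ (suf pref : List Char) (L maxf distinct : Int),
      BInv pref maxf distinct →
      (suf.foldl aStep' (wdict pref, L, (pref.length : Int))).2.1 =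
        ((PySem.List.enumerate suf (pref.length : Int)).foldl bStep
          (wdict pref, maxf, distinct, L)).2.2.2 := by
  intro suf
  induction suf with
  | nil => intro pref L maxf distinct _; simp [PySem.List.enumerate_nil]
  | cons c suf ih =>
    intro pref L maxf distinct hinv
    rw [PySem.List.enumerate_cons, List.foldl_cons, List.foldl_cons]
    have hfc : (wdict pref).getD c 0 = (pref.count c : Int) := wdict_getD pref c
    have hinv' := inv_step pref c maxf distinct hinv
    have hwne : pref ++ [c] ≠ [] := by simp
    have hiff := flag_iff (pref ++ [c]) hwne _ _ hinv'
    have hlen1 : (((pref ++ [c]).length : Nat) : Int) = (pref.length : Int) + 1 := by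
      rw [List.length_append]
      push_cast
      simp
    -- the two step results
    have hA : aStep' (wdict pref, L, (pref.length : Int)) c =
        (wdict (pref ++ [c]),
          (if aScan ((wdict (pref ++ [c])).values) (-1) then max L ((pref.length : Int) + 1)
            else L),
          ((pref ++ [c]).length : Int)) := by
      simp only [aStep', ← wdict_append, hlen1]
    have hcond : ((if (pref.count c : Int) + 1 > maxf then (pref.count c : Int) + 1 else maxf) *
          (if (pref.count c : Int) == 0 then distinct + 1 else distinct) ==
          (pref.length : Int) + 1) =
        aScan ((wdict (pref ++ [c])).values) (-1) := by
      by_cases hfl : aScan ((wdict (pref ++ [c])).values) (-1) = true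
      · rw [hfl]
        simp only [beq_iff_eq] at hiff ⊢
        rw [← hlen1]
        exact hiff.mp hfl
      · rw [Bool.not_eq_true] at hfl
        rw [hfl]
        simp only [beq_eq_false_iff_ne, ne_eq]
        rw [← hlen1]
        intro hh
        rw [hiff.mpr hh] at hfl
        exact Bool.true_eq_false.mp hfl
    have hB : bStep (wdict pref, maxf, distinct, L) ((pref.length : Int), c) =
        (wdict (pref ++ [c]),
          (if (pref.count c : Int) + 1 > maxf then (pref.count c : Int) + 1 else maxf),
          (if (pref.count c : Int) == 0 then distinct + 1 else distinct),
          (if aScan ((wdict (pref ++ [c])).values) (-1) then max L ((pref.length : Int) + 1)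
            else L)) := by
      simp only [bStep]
      rw [← wdict_append]
      simp only [hfc, hcond]
    rw [hA, hB, ← hlen1]
    exact ih (pref ++ [c]) _ _ _ hinv'

theorem per_i (cs : List Char) (i : Nat) (L : Int) :
    ((List.range' i (cs.length - i)).foldl (aInner cs i) (PySem.Dict.empty, L)).2 =
      ((PySem.List.enumerate (PySem.List.slice cs (some (i : Int)) none) 0).foldl bStep
        (PySem.Dict.empty, 0, 0, L)).2.2.2 := by
  have hslice : PySem.List.slice cs (some (i : Int)) none = cs.drop i :=
    PySem.List.slice_from_natCast cs i
  have hb := bridge_a cs i (cs.drop i) 0 PySem.Dict.empty L (by rw [Nat.add_zero])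
  rw [Nat.add_zero, List.length_drop] at hb
  rw [hb]
  have hm := main_inner (cs.drop i) [] L 0 0 inv_nil
  simp only [wdict, List.foldl_nil, List.length_nil, Nat.cast_zero] at hm
  rw [hslice]
  exact hm

-- ===== VERDICT (by name: the statement is the Claim_ definition above) =====
theorem longestBalanced_spec : Claim_equal_longestBalanced := by
  intro s _
  simp only [Spec_longestBalanced, longestBalanced, longestBalanced_alt]
  apply PySem.List.foldl_congr_mem
  exact fun L i _ => per_i s.toList i L
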